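-- pv_equiv track=rewrite | github.com/jlotto8/UDD | Practice Problems/Project Underdog/Bigger Wordplay Problems/06_bigger_wordplay_take_3.py | find_longest_chain_letters
-- ===== SOURCE A (Python) =====
-- def find_longest_chain_letters(words):
--     max_chain_letters = set()
--
--     # Iterate through each word in the list of words
--     for word in words:
--         sorted_word = sorted(word)
--         current_chain_letters = []
--         previous_letter = ' '
--
--         # Iterate through each letter in the sorted word
--         for letter in sorted_word:
--             if ord(letter) - ord(previous_letter) == 1:
--                 current_chain_letters.append(letter)
--             else:
--                 current_chain_letters = [letter]  # Start a new chain if sequence is broken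
--             previous_letter = letter
--
--             if len(current_chain_letters) > len(max_chain_letters):
--                 max_chain_letters = set(current_chain_letters)
--
--     return sorted(max_chain_letters)
-- ===== SOURCE B (Python) =====
-- def find_longest_chain_letters(words):
--     # Two-pointer scan: for each sorted word, jump run-by-run (j advances to the
--     # end of each maximal consecutive run), keeping the first longest run seen.
--     best = []
--     for w in words:
--         s = sorted(w)
--         n = len(s)
--         i = 0
--         while i < n:
--             j = i + 1
--             while j < n and ord(s[j]) - ord(s[j - 1]) == 1:
--                 j += 1
--             if j - i > len(best):
--                 best = s[i:j]
--             i = j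
--     return best
-- ===== Notes on version B (the rewrite author's own statement) =====
-- stated objective: simpler
-- what changed: A tracks a per-letter chain accumulator, a previous-letter sentinel and a running set updated after every letter; B scans each sorted word with two index pointers, jumping run-by-run (inner while finds the end of each maximal consecutive run) and keeping the first strictly longest run as a plain slice, returning it directly with no set and no final sort.
import Mathlib
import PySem

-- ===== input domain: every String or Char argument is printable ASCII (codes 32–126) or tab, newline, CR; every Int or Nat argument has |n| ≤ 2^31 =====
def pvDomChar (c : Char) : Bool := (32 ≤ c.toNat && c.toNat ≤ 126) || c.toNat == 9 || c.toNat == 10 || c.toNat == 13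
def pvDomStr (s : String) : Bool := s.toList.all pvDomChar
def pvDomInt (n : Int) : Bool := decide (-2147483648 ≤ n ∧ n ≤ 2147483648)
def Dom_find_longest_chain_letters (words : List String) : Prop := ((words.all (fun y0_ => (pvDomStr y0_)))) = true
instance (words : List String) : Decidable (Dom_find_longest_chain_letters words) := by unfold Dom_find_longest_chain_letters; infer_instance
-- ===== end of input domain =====

-- B replaces A's per-letter chain accumulator + running set with a two-pointer run scan
-- over each sorted word (objective: simpler); return values proved equal, no speed claim.

-- ===== PORT A =====
-- the body of A's inner per-letter loop, as a named step function
def pvStepA (st : List Char × Char × PySem.Set Char) (letter : Char) :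
    List Char × Char × PySem.Set Char :=
  let chain := if (letter.toNat : Int) - (st.2.1.toNat : Int) = 1 then st.1 ++ [letter] else [letter]
  let m := if chain.length > st.2.2.length then PySem.Set.ofList chain else st.2.2
  (chain, letter, m)

def find_longest_chain_letters (words : List String) : List String :=
  let max_chain : PySem.Set Char :=
    words.foldl (fun m word =>
      let sorted_word := PySem.List.sorted word.toList (fun c => c) false
      (sorted_word.foldl pvStepA ([], ' ', m)).2.2) PySem.Set.empty
  -- Python sorts the 1-char strings; exact: sorting the chars and wrapping each as a
  -- 1-char string afterwards gives the same list (codepoint order on both sides).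
  (PySem.List.sorted max_chain (fun c => c) false).map (fun c => String.ofList [c])

-- ===== PORT B =====
-- inner 'while j < n and ord(s[j]) - ord(s[j-1]) == 1: j += 1' (indices in range where read)
def pvRunEnd (s : List Char) (j : Nat) : Nat :=
  if h : j < s.length ∧ ((s.getD j ' ').toNat : Int) - ((s.getD (j-1) ' ').toNat : Int) = 1 then
    pvRunEnd s (j+1)
  else j
termination_by s.length - j
decreasing_by omega

-- lemma cited by pvScan's decreasing_by (the while loop advances j past i)
theorem pvRunEnd_ge (s : List Char) (j : Nat) : j ≤ pvRunEnd s j := by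
  fun_induction pvRunEnd <;> omega

-- outer 'while i < n' loop of B (s[i:j] is (s.drop i).take (j-i): exact for 0 ≤ i ≤ j)
def pvScan (s : List Char) (best : List Char) (i : Nat) : List Char :=
  if h : i < s.length then
    let j := pvRunEnd s (i+1)
    pvScan s (if j - i > best.length then (s.drop i).take (j - i) else best) j
  else best
termination_by s.length - i
decreasing_by have := pvRunEnd_ge s (i+1); omega

def find_longest_chain_letters_alt (words : List String) : List String :=
  (words.foldl (fun best w => pvScan (PySem.List.sorted w.toList (fun c => c) false) best 0) []).map
    (fun c => String.ofList [c])

-- ===== PRECONDITION & SPEC =====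
def Spec_find_longest_chain_letters (words : List String) (out : List String) : Prop := out = find_longest_chain_letters_alt words
instance (words : List String) (out : List String) : Decidable (Spec_find_longest_chain_letters words out) := by unfold Spec_find_longest_chain_letters; infer_instance

-- ===== CLAIM (what is proved, stated in full; the proofs are below) =====
def Claim_equal_find_longest_chain_letters : Prop := ∀ (words : List String), Dom_find_longest_chain_letters words → Spec_find_longest_chain_letters words (find_longest_chain_letters words)

-- ===== LEMMAS AND PROOFS =====

-- the maximal consecutive run of letters continuing from prev, plus the remainder
def pvTakeRun (prev : Char) : List Char → List Char × List Char
  | [] => ([], [])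
  | c :: rest =>
    if ((c.toNat : Int) - (prev.toNat : Int) = 1) then
      let p := pvTakeRun c rest
      (c :: p.1, p.2)
    else ([], c :: rest)

theorem pvTakeRun_append (prev : Char) (t : List Char) :
    (pvTakeRun prev t).1 ++ (pvTakeRun prev t).2 = t := by
  induction t generalizing prev with
  | nil => rfl
  | cons c rest ih =>
    simp only [pvTakeRun]
    split
    · simpa using ih c
    · rfl

theorem pvTakeRun_len (prev : Char) (t : List Char) :
    (pvTakeRun prev t).2.length ≤ t.length := by
  have h : (pvTakeRun prev t).1.length + (pvTakeRun prev t).2.length = t.length := by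
    rw [← List.length_append, pvTakeRun_append]
  omega

-- decomposition of a char list into maximal consecutive runs
def pvRuns : List Char → List (List Char)
  | [] => []
  | c :: rest => (c :: (pvTakeRun c rest).1) :: pvRuns (pvTakeRun c rest).2
termination_by t => t.length
decreasing_by have := pvTakeRun_len c rest; simp; omega

-- the run-level max step both sides reduce to
def pvStep2 (m r : List Char) : List Char := if r.length > m.length then r else m

theorem pvStep2_len (m a : List Char) : a.length ≤ (pvStep2 m a).length := by
  unfold pvStep2; split <;> omega

theorem pvStep2_absorb_prefix (m a t : List Char) :
    pvStep2 (pvStep2 m a) (a ++ t) = pvStep2 m (a ++ t) := by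
  rcases t with _ | ⟨x, t⟩
  · simp only [List.append_nil]
    unfold pvStep2; split_ifs <;> (try rfl) <;> omega
  · have hlt : a.length < (a ++ x :: t).length := by simp
    unfold pvStep2; split_ifs <;> (try rfl) <;> (exfalso; omega)

def pvConsec (l : List Char) : Prop := l.IsChain (fun a b => b.toNat = a.toNat + 1)

theorem pvTakeRun_consec (prev : Char) (t : List Char) :
    pvConsec (prev :: (pvTakeRun prev t).1) := by
  induction t generalizing prev with
  | nil => exact List.isChain_singleton prev
  | cons c rest ih =>
    simp only [pvTakeRun]
    split
    · rename_i h
      exact List.isChain_cons_cons.mpr ⟨by omega, ih c⟩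
    · exact List.isChain_singleton prev

theorem pvConsec_pairwise_lt (l : List Char) (h : pvConsec l) : l.Pairwise (· < ·) := by
  have h2 : l.IsChain (· < ·) := by
    refine h.imp ?_
    intro a b hab
    have hn : a.toNat < b.toNat := by omega
    show a.val < b.val
    exact UInt32.lt_iff_toNat_lt.mpr hn
  exact List.isChain_iff_pairwise.mp h2

theorem pvConsec_nodup (l : List Char) (h : pvConsec l) : l.Nodup :=
  (pvConsec_pairwise_lt l h).imp (fun hab => ne_of_lt hab)

theorem pvConsec_append_succ (chain : List Char) (c : Char)
    (h : pvConsec chain) (hlast : ∀ x ∈ chain.getLast?, c.toNat = x.toNat + 1) :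
    pvConsec (chain ++ [c]) := by
  unfold pvConsec at h ⊢
  exact h.append (List.isChain_singleton c) (by intro x hx y hy; simp at hy; subst hy; exact hlast x hx)

-- ---- A-side: the inner per-letter fold computes the run-level fold ----

theorem innerA_go (s : List Char) :
    ∀ (chain m : List Char) (prev : Char),
      chain ≠ [] → chain.getLast? = some prev → pvConsec chain → chain.length ≤ m.length →
      (s.foldl pvStepA (chain, prev, m)).2.2 =
        List.foldl pvStep2 m ((chain ++ (pvTakeRun prev s).1) :: pvRuns (pvTakeRun prev s).2) := by
  induction s with
  | nil =>
    intro chain m prev hne hlast hcon hle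
    simp only [List.foldl_nil, pvTakeRun, pvRuns, List.append_nil, List.foldl_cons]
    unfold pvStep2
    rw [if_neg (by omega)]
  | cons c s' ih =>
    intro chain m prev hne hlast hcon hle
    by_cases hc : ((c.toNat : Int) - (prev.toNat : Int) = 1)
    · -- chain extends
      have hcon' : pvConsec (chain ++ [c]) := by
        refine pvConsec_append_succ chain c hcon ?_
        intro x hx
        rw [hlast] at hx; simp at hx; subst hx; omega
      have hofl : PySem.Set.ofList (chain ++ [c]) = chain ++ [c] :=
        PySem.Set.ofList_eq_self_of_nodup _ (pvConsec_nodup _ hcon')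
      have hstep : List.foldl pvStepA ((chain, prev, m)) (c :: s') =
          List.foldl pvStepA (chain ++ [c], c, pvStep2 m (chain ++ [c])) s' := by
        simp only [List.foldl_cons]
        congr 1
        simp only [pvStepA, if_pos hc, pvStep2, hofl]
      rw [hstep,
        ih (chain ++ [c]) (pvStep2 m (chain ++ [c])) c (by simp) (by simp) hcon'
          (pvStep2_len m (chain ++ [c]))]
      simp only [pvTakeRun, if_pos hc]
      simp only [List.foldl_cons]
      rw [show chain ++ c :: (pvTakeRun c s').1 = (chain ++ [c]) ++ (pvTakeRun c s').1 by simp,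
        pvStep2_absorb_prefix]
    · -- chain resets to [c]
      have hofl : PySem.Set.ofList [c] = [c] :=
        PySem.Set.ofList_eq_self_of_nodup _ (List.nodup_singleton c)
      have hstep : List.foldl pvStepA ((chain, prev, m)) (c :: s') =
          List.foldl pvStepA ([c], c, pvStep2 m [c]) s' := by
        simp only [List.foldl_cons]
        congr 1
        simp only [pvStepA, if_neg hc, pvStep2, hofl, List.length_cons, List.length_nil]
        rfl
      rw [hstep,
        ih [c] (pvStep2 m [c]) c (by simp) (by simp) (List.isChain_singleton c)
          (pvStep2_len m [c])]
      simp only [pvTakeRun, if_neg hc, pvRuns]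
      simp only [List.foldl_cons, List.append_nil, List.singleton_append]
      have h1 : pvStep2 m chain = m := by unfold pvStep2; rw [if_neg (by omega)]
      have h2 : pvStep2 (pvStep2 m [c]) (c :: (pvTakeRun c s').1) =
          pvStep2 m (c :: (pvTakeRun c s').1) := by
        simpa using pvStep2_absorb_prefix m [c] (pvTakeRun c s').1
      rw [h1, h2]

theorem innerA_eq (s : List Char) (m : List Char) :
    (s.foldl pvStepA ([], ' ', m)).2.2 = List.foldl pvStep2 m (pvRuns s) := by
  cases s with
  | nil => simp [pvRuns]
  | cons c s' =>
    have hofl : PySem.Set.ofList [c] = [c] := PySem.Set.ofList_eq_self_of_nodup _ (List.nodup_singleton c)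
    have hstep : List.foldl pvStepA (([], ' ', m)) (c :: s') =
        List.foldl pvStepA ([c], c, pvStep2 m [c]) s' := by
      simp only [List.foldl_cons]
      congr 1
      simp only [pvStepA, pvStep2, List.length_cons, List.length_nil, List.nil_append]
      split <;> rfl
    rw [hstep,
      innerA_go s' [c] (pvStep2 m [c]) c (by simp) (by simp) (List.isChain_singleton c)
        (pvStep2_len m [c])]
    simp only [pvRuns, List.foldl_cons, List.singleton_append]
    have h2 : pvStep2 (pvStep2 m [c]) (c :: (pvTakeRun c s').1) =
        pvStep2 m (c :: (pvTakeRun c s').1) := by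
      simpa using pvStep2_absorb_prefix m [c] (pvTakeRun c s').1
    rw [h2]

-- ---- B-side: the index scan computes the same run-level fold ----

theorem pvRunEnd_spec (s : List Char) (j : Nat) :
    0 < j → j ≤ s.length →
    pvRunEnd s j = j + (pvTakeRun (s.getD (j-1) ' ') (s.drop j)).1.length := by
  fun_induction pvRunEnd s j with
  | case1 j h ih =>
    intro h1 h2
    rw [ih (by omega) (by omega)]
    have hdrop : s.drop j = s.getD j ' ' :: s.drop (j+1) := by
      rw [List.getD_eq_getElem s ' ' h.1]
      exact (List.getElem_cons_drop h.1).symm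
    rw [hdrop]
    simp only [pvTakeRun, if_pos h.2, List.length_cons, Nat.add_sub_cancel]
    omega
  | case2 j h =>
    intro h1 h2
    rcases Nat.lt_or_ge j s.length with hlt | hge
    · have hdrop : s.drop j = s.getD j ' ' :: s.drop (j+1) := by
        rw [List.getD_eq_getElem s ' ' hlt]
        exact (List.getElem_cons_drop hlt).symm
      have hne : ¬ (((s.getD j ' ').toNat : Int) - ((s.getD (j-1) ' ').toNat : Int) = 1) := by
        intro hx; exact h ⟨hlt, hx⟩
      rw [hdrop]
      simp only [pvTakeRun, if_neg hne, List.length_nil]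
      omega
    · rw [List.drop_eq_nil_of_le hge]
      simp [pvTakeRun]

theorem pvScan_eq (s : List Char) (best : List Char) (i : Nat) :
    i ≤ s.length →
    pvScan s best i = List.foldl pvStep2 best (pvRuns (s.drop i)) := by
  fun_induction pvScan s best i with
  | case1 best i h j ih =>
    intro hle
    simp only [dite_eq_ite] at ih
    have hspec := pvRunEnd_spec s (i+1) (by omega) (by omega)
    have hij : (i+1) - 1 = i := by omega
    rw [hij] at hspec
    have hgd : s.getD i ' ' = s[i]'h := List.getD_eq_getElem s ' ' h
    rw [hgd] at hspec
    set r := (pvTakeRun (s[i]'h) (s.drop (i+1))).1 with hr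
    set rest := (pvTakeRun (s[i]'h) (s.drop (i+1))).2 with hrest
    have happ : r ++ rest = s.drop (i+1) := pvTakeRun_append _ _
    have hlenr : r.length + rest.length = (s.drop (i+1)).length := by
      rw [← List.length_append, happ]
    have hdropi : s.drop i = (s[i]'h) :: s.drop (i+1) := (List.getElem_cons_drop h).symm
    have hruns : pvRuns (s.drop i) = ((s[i]'h) :: r) :: pvRuns rest := by
      rw [hdropi]; simp only [pvRuns]; rw [← hr, ← hrest]
    have hj : j = i + 1 + r.length := hspec
    have htake : (s.drop i).take (j - i) = (s[i]'h) :: r := by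
      rw [hdropi, hj]
      have : i + 1 + r.length - i = r.length + 1 := by omega
      rw [this]
      simp only [List.take_succ_cons]
      congr 1
      rw [← happ, List.take_left]
    have hdropj : s.drop j = rest := by
      rw [hj, ← List.drop_drop, ← happ, List.drop_left]
    have hjlen : j ≤ s.length := by
      have := List.length_drop (l := s) (i := i+1)
      omega
    rw [ih hjlen, hruns, List.foldl_cons, hdropj]
    congr 1
    rw [htake]
    unfold pvStep2
    have : j - i = ((s[i]'h) :: r).length := by simp [hj]; omega
    rw [this]
  | case2 best i h =>
    intro hle
    have : i = s.length := by omega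
    rw [this, List.drop_length]
    simp [pvRuns]

-- ---- assembling ----

theorem pvRuns_consec (s : List Char) : ∀ r ∈ pvRuns s, pvConsec r := by
  fun_induction pvRuns with
  | case1 => simp
  | case2 c rest ih =>
    intro r hr
    simp only [List.mem_cons] at hr
    rcases hr with hr | hr
    · subst hr; exact pvTakeRun_consec c rest
    · exact ih r hr

theorem foldl_step2_consec (rs : List (List Char)) :
    ∀ m, pvConsec m → (∀ r ∈ rs, pvConsec r) → pvConsec (List.foldl pvStep2 m rs) := by
  induction rs with
  | nil => intro m hm _; exact hm
  | cons r rs ih =>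
    intro m hm hrs
    simp only [List.foldl_cons]
    refine ih _ ?_ (fun x hx => hrs x (by simp [hx]))
    unfold pvStep2
    split
    · exact hrs r (by simp)
    · exact hm

theorem outer_eq (words : List String) :
    (words.foldl (fun m word =>
        ((PySem.List.sorted word.toList (fun c => c) false).foldl pvStepA ([], ' ', m)).2.2)
      ([] : List Char)) =
    (words.foldl (fun best w => pvScan (PySem.List.sorted w.toList (fun c => c) false) best 0) []) ∧
    pvConsec (words.foldl (fun best w => pvScan (PySem.List.sorted w.toList (fun c => c) false) best 0) []) := by
  rw [← List.foldr_reverse, ← List.foldr_reverse]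
  induction words.reverse with
  | nil => exact ⟨rfl, List.IsChain.nil⟩
  | cons w ws ih =>
    simp only [List.foldr_cons]
    obtain ⟨heq, hcon⟩ := ih
    rw [heq]
    set m := List.foldr (fun w best => pvScan (PySem.List.sorted w.toList (fun c => c) false) best 0) [] ws
    set sw := PySem.List.sorted w.toList (fun c => c) false
    have hA := innerA_eq sw m
    have hB := pvScan_eq sw m 0 (by omega)
    rw [List.drop_zero] at hB
    refine ⟨by rw [hA, hB], ?_⟩
    rw [hB]
    exact foldl_step2_consec _ m hcon (pvRuns_consec sw)

theorem final_eq (words : List String) :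
    find_longest_chain_letters words = find_longest_chain_letters_alt words := by
  unfold find_longest_chain_letters find_longest_chain_letters_alt
  obtain ⟨heq, hcon⟩ := outer_eq words
  have hempty : (PySem.Set.empty : PySem.Set Char) = ([] : List Char) := rfl
  simp only [hempty]
  rw [heq]
  congr 1
  exact PySem.List.sorted_eq_self_of_pairwise _ _
    ((pvConsec_pairwise_lt _ hcon).imp (fun h => le_of_lt h))

-- ===== VERDICT (by name: the statement is the Claim_ definition above) =====
theorem find_longest_chain_letters_spec : Claim_equal_find_longest_chain_letters := by
  intro words _
  unfold Spec_find_longest_chain_letters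
  exact final_eq words
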